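-- pv_equiv track=rewrite | github.com/Sett11/bin2path | bin2path/encode.py | _encode_dirs
-- ===== SOURCE A (Python) =====
-- def _encode_dirs(bits: list[int]) -> list[str]:
--     """
--     Encode bit sequence (MSB first) into sequence of direction symbols L/R/U/D.
--
--     Rules:
--     - first bit:
--         0 -> L
--         1 -> R
--     - subsequent bits:
--         if bit == 0:
--             if previous step == L -> D
--             else -> L
--         if bit == 1:
--             if previous step == R -> U
--             else -> R
--     """
--     if not bits:
--         return []
--
--     dirs: list[str] = []
--
--     # first bit
--     first = bits[0]
--     cur_dir = "L" if first == 0 else "R"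
--     dirs.append(cur_dir)
--
--     for b in bits[1:]:
--         if b == 0:
--             if cur_dir == "L":
--                 cur_dir = "D"
--             else:
--                 cur_dir = "L"
--         else:  # b == 1
--             if cur_dir == "R":
--                 cur_dir = "U"
--             else:
--                 cur_dir = "R"
--         dirs.append(cur_dir)
--
--     return dirs
-- ===== SOURCE B (Python) =====
-- def _encode_dirs(bits: list[int]) -> list[str]:
--     """Run-structure decomposition: group bits into maximal runs of the same
--     family (bit == 0); within a run symbols alternate base/special, where
--     family-0 is ("L", "D") and family-1 is ("R", "U")."""
--     out: list[str] = []
--     i = 0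
--     n = len(bits)
--     while i < n:
--         fam = bits[i] == 0
--         j = i + 1
--         while j < n and (bits[j] == 0) == fam:
--             j += 1
--         base, spec = ("L", "D") if fam else ("R", "U")
--         out += [base if k % 2 == 0 else spec for k in range(j - i)]
--         i = j
--     return out
-- ===== Notes on version B (the rewrite author's own statement) =====
-- stated objective: alternative
-- what changed: Replaced A's previous-direction state machine with a run-length decomposition: bits are grouped into maximal runs of the same family (bit == 0), and each run emits its family's base/special symbols alternating by offset.
import Mathlib
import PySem

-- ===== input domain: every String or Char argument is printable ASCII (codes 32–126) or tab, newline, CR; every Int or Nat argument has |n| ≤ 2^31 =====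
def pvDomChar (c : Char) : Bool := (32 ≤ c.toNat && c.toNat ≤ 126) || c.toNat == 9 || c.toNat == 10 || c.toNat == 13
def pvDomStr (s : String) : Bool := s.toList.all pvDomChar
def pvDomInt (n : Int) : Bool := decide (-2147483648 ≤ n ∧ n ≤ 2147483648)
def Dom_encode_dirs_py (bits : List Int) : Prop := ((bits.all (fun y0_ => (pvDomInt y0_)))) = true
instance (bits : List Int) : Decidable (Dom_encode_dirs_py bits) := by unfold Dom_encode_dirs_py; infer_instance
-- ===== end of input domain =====

-- B replaces A's previous-direction state machine by a run-of-same-family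
-- decomposition with alternating symbols inside each run (objective: alternative).

-- ===== PORT A =====
-- the for-loop of A: state is cur_dir, each step emits the new cur_dir
def pvALoop : List Int → String → List String
  | [], _ => []
  | b :: bs, cur =>
    let nd := if b == 0 then (if cur == "L" then "D" else "L")
              else (if cur == "R" then "U" else "R")
    nd :: pvALoop bs nd

def encode_dirs_py (bits : List Int) : List String :=
  match bits with
  | [] => []
  | first :: rest =>
    let cur := if first == 0 then "L" else "R"
    cur :: pvALoop rest cur

-- ===== PORT B =====
-- outer while loop of Source B = recursion on the suffix bits[i:]; the inner scan
-- finding the run end is the takeWhile length; the comprehension is range.map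
def encode_dirs_py_alt (bits : List Int) : List String :=
  match bits with
  | [] => []
  | b :: rest =>
    let fam := b == 0
    let r := (rest.takeWhile (fun x => (x == 0) == fam)).length
    ((List.range (r + 1)).map
        (fun k => if k % 2 == 0 then (if fam then "L" else "R") else (if fam then "D" else "U")))
      ++ encode_dirs_py_alt (rest.drop r)
termination_by bits.length
decreasing_by simp [List.length_drop]

-- ===== PRECONDITION & SPEC =====
def Spec_encode_dirs_py (bits : List Int) (out : List String) : Prop := out = encode_dirs_py_alt bits
instance (bits : List Int) (out : List String) : Decidable (Spec_encode_dirs_py bits out) := by unfold Spec_encode_dirs_py; infer_instance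

-- ===== CLAIM (what is proved, stated in full; the proofs are below) =====
def Claim_equal_encode_dirs_py : Prop := ∀ (bits : List Int), Dom_encode_dirs_py bits → Spec_encode_dirs_py bits (encode_dirs_py bits)

-- ===== LEMMAS AND PROOFS =====

lemma pvAlt_nil : encode_dirs_py_alt [] = [] := by
  rw [encode_dirs_py_alt.eq_def]

-- the symbol at offset i of a run of family `fam`
def pvSym (fam : Bool) (i : Nat) : String :=
  if i % 2 == 0 then (if fam then "L" else "R") else (if fam then "D" else "U")

lemma pvAlt_cons (b : Int) (rest : List Int) :
    encode_dirs_py_alt (b :: rest) =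
      ((List.range ((rest.takeWhile (fun x => (x == 0) == (b == 0))).length + 1)).map
          (pvSym (b == 0)))
        ++ encode_dirs_py_alt
            (rest.drop (rest.takeWhile (fun x => (x == 0) == (b == 0))).length) := by
  rw [encode_dirs_py_alt.eq_def]
  rfl

lemma pvStep_eq (b : Int) (fam : Bool) (i : Nat) :
    (if b == 0 then (if pvSym fam i == "L" then "D" else "L")
     else (if pvSym fam i == "R" then "U" else "R"))
    = if (b == 0) == fam then pvSym fam (i + 1) else pvSym (b == 0) 0 := by
  by_cases hb : b = 0 <;> cases fam <;>
    rcases Nat.mod_two_eq_zero_or_one i with h | h <;>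
    simp [pvSym, hb, h, Nat.add_mod]

lemma pvMap_shift1 (fam : Bool) (i : Nat) (l : List Nat) :
    List.map (fun j => pvSym fam (i + 1 + 1 + j)) l
      = List.map ((fun j => pvSym fam (i + 1 + j)) ∘ Nat.succ) l :=
  List.map_congr_left (fun a _ => by
    simp only [Function.comp_apply]; congr 1; omega)

lemma pvMap_shift0 (fam : Bool) (l : List Nat) :
    List.map (fun j => pvSym fam (0 + 1 + j)) l = List.map (pvSym fam ∘ Nat.succ) l :=
  List.map_congr_left (fun a _ => by
    simp only [Function.comp_apply]; congr 1; omega)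

lemma pvALoop_core (rest : List Int) (fam : Bool) (i : Nat) :
    pvALoop rest (pvSym fam i) =
      (List.range (rest.takeWhile (fun x => (x == 0) == fam)).length).map
          (fun j => pvSym fam (i + 1 + j))
        ++ encode_dirs_py_alt
            (rest.drop (rest.takeWhile (fun x => (x == 0) == fam)).length) := by
  induction rest generalizing fam i with
  | nil => simp [pvALoop, pvAlt_nil]
  | cons x xs ih =>
    by_cases hx : (x == 0) = fam
    · have htw : (x :: xs).takeWhile (fun y => (y == 0) == fam)
          = x :: xs.takeWhile (fun y => (y == 0) == fam) := by
        simp [hx]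
      rw [htw]
      show (let nd := _ ; nd :: pvALoop xs nd) = _
      rw [pvStep_eq x fam i]
      simp only [hx, beq_self_eq_true, if_true]
      rw [ih fam (i + 1)]
      simp only [List.length_cons, List.drop_succ_cons, List.range_succ_eq_map,
        List.map_map, List.map_cons, List.cons_append, Nat.add_zero]
      congr 1
      congr 1
      exact pvMap_shift1 fam i _
    · have htw : (x :: xs).takeWhile (fun y => (y == 0) == fam) = [] := by
        simp [hx]
      rw [htw]
      show (let nd := _ ; nd :: pvALoop xs nd) = _
      rw [pvStep_eq x fam i]
      have hne : ((x == 0) == fam) = false := by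
        cases h : (x == 0) <;> cases fam <;> simp_all
      rw [hne]
      simp only [if_false, Bool.false_eq_true]
      rw [ih (x == 0) 0]
      simp only [List.length_nil, List.drop_zero, List.range_zero, List.map_nil,
        List.nil_append]
      rw [pvAlt_cons]
      simp only [List.range_succ_eq_map, List.map_map, List.map_cons,
        List.cons_append]
      congr 1
      congr 1
      exact pvMap_shift0 (x == 0) _

-- ===== VERDICT (by name: the statement is the Claim_ definition above) =====
theorem encode_dirs_py_spec : Claim_equal_encode_dirs_py := by
  intro bits _
  unfold Spec_encode_dirs_py
  match bits with
  | [] => simp [encode_dirs_py, pvAlt_nil]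
  | b :: rest =>
    rw [encode_dirs_py, pvAlt_cons]
    have hcur : (if b == 0 then "L" else "R") = pvSym (b == 0) 0 := by
      cases h : (b == 0) <;> simp [pvSym]
    rw [hcur, pvALoop_core rest (b == 0) 0]
    simp only [List.range_succ_eq_map, List.map_map, List.map_cons,
      List.cons_append]
    congr 1
    congr 1
    exact pvMap_shift0 (b == 0) _
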